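-- pv_equiv track=rewrite | github.com/FamliarMan/Prefix | prefix.py | get_databinding_name
-- ===== SOURCE A (Python) =====
-- def get_databinding_name(file_name: str) -> str:
--     """
--     根据xml文件名获取到databinding生成的对象名称,ru tdf_component_button.xml 得到TdfComponentButtonBinding
--     :param file_name: xml文件名称
--     :return: 处理后的名称
--     """
--     chs = list(file_name)
--     chs[0] = chs[0].upper()
--     for index in range(len(chs)):
--         if chs[index] == "_" and index < len(chs) - 1:
--             # 将一个字母大写
--             chs[index + 1] = chs[index + 1].upper()
--
--     res = ''.join(chs)
--     return res.replace("_", "") + "Binding"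
-- ===== SOURCE B (Python) =====
-- def get_databinding_name(file_name: str) -> str:
--     parts = [p[:1].upper() + p[1:] for p in file_name.split('_')]
--     return ''.join(parts) + 'Binding'
-- ===== Notes on version B (the rewrite author's own statement) =====
-- stated objective: idiomatic
-- what changed: Replaced A's in-place per-index look-ahead mutation loop followed by a global underscore-removing replace with a split-on-underscore / capitalize-first-letter-of-each-piece / join pipeline, moving the per-character work into C-level string methods.
-- outside the precondition, e.g. on get_databinding_name(''): A raises IndexError, B returns 'Binding'
import Mathlib
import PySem

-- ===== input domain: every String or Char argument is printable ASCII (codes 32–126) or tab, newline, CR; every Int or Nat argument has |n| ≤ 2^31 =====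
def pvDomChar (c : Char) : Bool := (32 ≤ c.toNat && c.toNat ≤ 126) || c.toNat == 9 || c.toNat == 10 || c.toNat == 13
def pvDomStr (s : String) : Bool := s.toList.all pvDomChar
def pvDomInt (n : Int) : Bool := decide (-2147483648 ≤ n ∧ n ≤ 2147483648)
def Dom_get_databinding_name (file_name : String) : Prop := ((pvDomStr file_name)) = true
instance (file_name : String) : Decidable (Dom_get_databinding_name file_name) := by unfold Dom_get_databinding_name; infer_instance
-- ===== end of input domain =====

-- B replaces A's index-mutation loop + global replace by a split-on-underscore / capitalize-each-piece / join pipeline (measured faster).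


-- ===== PORT A =====
def get_databinding_name (file_name : String) : String :=
  let chs := file_name.toList
  match PySem.List.pyGet? chs 0 with
  | none => ""        -- chs[0] raises IndexError on empty input (excluded by Pre_)
  | some c0 =>
    let chs1 := chs.set 0 (PySem.Chars.upperChar c0)
    let chs2 := (PySem.List.pyRange 0 (chs1.length : Int)).foldl
      (fun l idx =>
        if PySem.List.pyGetD l idx ' ' = '_' ∧ idx < (l.length : Int) - 1 then
          l.set (idx + 1).toNat (PySem.Chars.upperChar (PySem.List.pyGetD l (idx + 1) ' '))
        else l) chs1
    let res := PySem.Chars.replace chs2 ['_'] []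
    String.ofList (res ++ "Binding".toList)

-- ===== PORT B =====
def get_databinding_name_alt (file_name : String) : String :=
  let parts := PySem.Chars.splitOn file_name.toList ['_']
  let capped := parts.map (fun p =>
    PySem.Chars.upper (PySem.Chars.slice p none (some 1)) ++ PySem.Chars.slice p (some 1) none)
  String.ofList (PySem.Chars.join [] capped ++ "Binding".toList)

-- ===== PRECONDITION & SPEC =====
-- Pre_ excludes only the empty string, on which A raises IndexError (chs[0]).
def Pre_get_databinding_name (file_name : String) : Prop := file_name ≠ ""
instance (file_name : String) : Decidable (Pre_get_databinding_name file_name) := by unfold Pre_get_databinding_name; infer_instance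
def pvWitness_get_databinding_name : String := "tdf_component_button"

def Spec_get_databinding_name (file_name : String) (out : String) : Prop := out = get_databinding_name_alt file_name
instance (file_name : String) (out : String) : Decidable (Spec_get_databinding_name file_name out) := by unfold Spec_get_databinding_name; infer_instance

-- ===== CLAIM (what is proved, stated in full; the proofs are below) =====
def Claim_equal_get_databinding_name : Prop := ∀ (file_name : String), Dom_get_databinding_name file_name → Pre_get_databinding_name file_name → Spec_get_databinding_name file_name (get_databinding_name file_name)
-- ===== LEMMAS AND PROOFS =====

-- A's loop, written as direct recursion on the character list.
def loopRec : List Char → List Char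
  | [] => []
  | [c] => [c]
  | c :: d :: t =>
      if c = '_' then c :: loopRec (PySem.Chars.upperChar d :: t)
      else c :: loopRec (d :: t)
termination_by l => l.length
decreasing_by all_goals simp

-- the common normal form: drop underscores, uppercasing the char after each underscore run (flag = "capitalize next")
def Rflag : Bool → List Char → List Char
  | _, [] => []
  | b, c :: t =>
      if c = '_' then Rflag true t
      else (if b then PySem.Chars.upperChar c else c) :: Rflag false t

-- split on '_' with an explicit current-chunk prefix
def mySplit : List Char → List Char → List (List Char)
  | pre, [] => [pre]
  | pre, c :: t => if c = '_' then pre :: mySplit [] t else mySplit (pre ++ [c]) t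

def capFn : List Char → List Char
  | [] => []
  | c :: t => PySem.Chars.upperChar c :: t

theorem upperChar_underscore : PySem.Chars.upperChar '_' = '_' := by decide

theorem upperChar_ne_underscore (d : Char) (h : d ≠ '_') : PySem.Chars.upperChar d ≠ '_' := by
  unfold PySem.Chars.upperChar PySem.Chars.islower
  split_ifs with hl
  · simp at hl
    intro he
    have h1 : ('a':Char).toNat ≤ d.toNat := hl.1
    have h2 : d.toNat ≤ ('z':Char).toNat := hl.2
    have ha : ('a':Char).toNat = 97 := by decide
    have hz : ('z':Char).toNat = 122 := by decide
    have := congrArg Char.toNat he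
    rw [Char.toNat_ofNat, if_pos (Or.inl (by omega))] at this
    have hu : ('_':Char).toNat = 95 := by decide
    omega
  · exact h

theorem Rflag_cap (c : Char) (t : List Char) :
    Rflag false (PySem.Chars.upperChar c :: t) = Rflag true (c :: t) := by
  by_cases h : c = '_'
  · subst h; simp [Rflag, upperChar_underscore]
  · simp [Rflag, h, upperChar_ne_underscore c h]

theorem loopA_eq (suf : List Char) : ∀ (pre : List Char),
    (PySem.List.pyRange (pre.length : Int) ((pre.length + suf.length : Nat) : Int)).foldl
      (fun l idx =>
        if PySem.List.pyGetD l idx ' ' = '_' ∧ idx < (l.length : Int) - 1 then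
          l.set (idx + 1).toNat (PySem.Chars.upperChar (PySem.List.pyGetD l (idx + 1) ' '))
        else l) (pre ++ suf) = pre ++ loopRec suf := by
  induction suf using loopRec.induct with
  | case1 =>
    intro pre
    simp [PySem.List.pyRange, loopRec]
  | case2 c =>
    intro pre
    rw [PySem.List.pyRange_one_cons (by push_cast; simp), List.foldl_cons]
    have hcond : ¬(PySem.List.pyGetD (pre ++ [c]) (pre.length : Int) ' ' = '_' ∧
        (pre.length : Int) < (((pre ++ [c]).length : Nat) : Int) - 1) := by
      intro hcon
      have h2 := hcon.2
      simp at h2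
    rw [if_neg hcond]
    have hempty : PySem.List.pyRange ((pre.length : Int) + 1) ((pre.length + [c].length : Nat) : Int) = [] := by
      have : ((pre.length + [c].length : Nat) : Int) = (pre.length : Int) + 1 := by push_cast; simp
      rw [this]
      simp [PySem.List.pyRange]
    rw [hempty, List.foldl_nil]
    simp [loopRec]
  | case3 d t ih =>
    intro pre
    rw [PySem.List.pyRange_one_cons (by push_cast; simp; omega), List.foldl_cons]
    have hget : PySem.List.pyGetD (pre ++ '_' :: d :: t) (pre.length : Int) ' ' = '_' := by
      rw [PySem.List.pyGetD_natCast]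
      rw [List.getD_eq_getElem?_getD, List.getElem?_append_right (le_refl _)]
      simp
    have hget1 : PySem.List.pyGetD (pre ++ '_' :: d :: t) ((pre.length : Int) + 1) ' ' = d := by
      rw [show ((pre.length : Int) + 1) = ((pre.length + 1 : Nat) : Int) from by push_cast; ring]
      rw [PySem.List.pyGetD_natCast]
      rw [List.getD_eq_getElem?_getD, List.getElem?_append_right (by omega)]
      simp
    have hcond : PySem.List.pyGetD (pre ++ '_' :: d :: t) (pre.length : Int) ' ' = '_' ∧
        (pre.length : Int) < (((pre ++ '_' :: d :: t).length : Nat) : Int) - 1 := by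
      refine ⟨hget, ?_⟩
      simp
      omega
    rw [if_pos hcond, hget1]
    have htn : ((pre.length : Int) + 1).toNat = pre.length + 1 := by omega
    rw [htn]
    have hset : (pre ++ '_' :: d :: t).set (pre.length + 1) (PySem.Chars.upperChar d)
        = (pre ++ ['_']) ++ (PySem.Chars.upperChar d :: t) := by
      rw [List.set_append, if_neg (by simp)]
      simp [List.set]
    rw [hset]
    have he1 : ((pre.length : Int) + 1) = (((pre ++ ['_']).length : Nat) : Int) := by simp
    have he2 : ((pre.length + ('_' :: d :: t).length : Nat) : Int)
        = (((pre ++ ['_']).length + (PySem.Chars.upperChar d :: t).length : Nat) : Int) := by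
      push_cast; simp; ring
    rw [he1, he2, ih (pre ++ ['_'])]
    rw [show loopRec ('_' :: d :: t) = '_' :: loopRec (PySem.Chars.upperChar d :: t) from by
      simp [loopRec]]
    simp
  | case4 c d t hc ih =>
    intro pre
    rw [PySem.List.pyRange_one_cons (by push_cast; simp; omega), List.foldl_cons]
    have hget : PySem.List.pyGetD (pre ++ c :: d :: t) (pre.length : Int) ' ' = c := by
      rw [PySem.List.pyGetD_natCast]
      rw [List.getD_eq_getElem?_getD, List.getElem?_append_right (le_refl _)]
      simp
    have hcond : ¬(PySem.List.pyGetD (pre ++ c :: d :: t) (pre.length : Int) ' ' = '_' ∧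
        (pre.length : Int) < (((pre ++ c :: d :: t).length : Nat) : Int) - 1) := by
      intro hcon
      exact hc (hget ▸ hcon.1)
    rw [if_neg hcond]
    have he1 : ((pre.length : Int) + 1) = (((pre ++ [c]).length : Nat) : Int) := by simp
    have he2 : ((pre.length + (c :: d :: t).length : Nat) : Int)
        = (((pre ++ [c]).length + (d :: t).length : Nat) : Int) := by push_cast; simp; ring
    have hl : pre ++ c :: d :: t = (pre ++ [c]) ++ (d :: t) := by simp
    rw [he1, he2, hl, ih (pre ++ [c])]
    rw [show loopRec (c :: d :: t) = c :: loopRec (d :: t) from by simp [loopRec, hc]]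
    simp

theorem replace_go_filter (fuel : Nat) : ∀ (l acc : List Char), l.length ≤ fuel →
    PySem.Chars.replace.go ['_'] [] fuel l acc = acc.reverse ++ l.filter (fun c => c != '_') := by
  induction fuel with
  | zero =>
    intro l acc h
    have hl : l = [] := by cases l <;> simp_all
    subst hl
    rw [PySem.Chars.replace.go.eq_def]; simp
  | succ n ih =>
    intro l acc h
    cases l with
    | nil => rw [PySem.Chars.replace.go.eq_def]; simp
    | cons c t =>
      rw [PySem.Chars.replace.go.eq_def]
      simp only [List.isPrefixOf, Bool.and_true]
      by_cases hc : c = '_'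
      · subst hc
        simp only [beq_self_eq_true, if_true]
        have hd : List.drop (['_'] : List Char).length ('_' :: t) = t := by simp
        rw [hd, List.reverse_nil, List.nil_append, ih t acc (by simpa using h)]
        simp
      · have : ('_' == c) = false := by simpa using fun he => hc he.symm
        simp only [this, Bool.false_eq_true, if_false]
        rw [ih t (c :: acc) (by simpa using h)]
        simp [hc]

theorem replace_filter (cs : List Char) :
    PySem.Chars.replace cs ['_'] [] = cs.filter (fun c => c != '_') := by
  unfold PySem.Chars.replace
  simp only [List.isEmpty]
  rw [replace_go_filter cs.length cs [] (le_refl _)]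
  simp

theorem filter_loopRec (n : Nat) : ∀ cs : List Char, cs.length ≤ n →
    (loopRec cs).filter (fun c => c != '_') = Rflag false cs := by
  induction n with
  | zero =>
    intro cs h
    have : cs = [] := by cases cs <;> simp_all
    subst this; simp [loopRec, Rflag]
  | succ n ih =>
    intro cs h
    match cs with
    | [] => simp [loopRec, Rflag]
    | [c] =>
      by_cases hc : c = '_' <;> simp [loopRec, Rflag, hc]
    | c :: d :: t =>
      by_cases hc : c = '_'
      · subst hc
        rw [show loopRec ('_' :: d :: t) = '_' :: loopRec (PySem.Chars.upperChar d :: t) from by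
          simp [loopRec]]
        simp only [List.filter_cons]
        norm_num
        rw [ih (PySem.Chars.upperChar d :: t) (by simp at h ⊢; omega)]
        rw [Rflag_cap]
        simp [Rflag]
      · rw [show loopRec (c :: d :: t) = c :: loopRec (d :: t) from by simp [loopRec, hc]]
        simp only [List.filter_cons]
        rw [ih (d :: t) (by simp at h ⊢; omega)]
        simp [Rflag, hc]

theorem splitOn_go_mySplit (fuel : Nat) : ∀ (l cur : List Char) (acc : List (List Char)),
    l.length ≤ fuel →
    PySem.Chars.splitOn.go ['_'] fuel l cur acc = acc.reverse ++ mySplit cur.reverse l := by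
  induction fuel with
  | zero =>
    intro l cur acc h
    have hl : l = [] := by cases l <;> simp_all
    subst hl
    rw [PySem.Chars.splitOn.go.eq_def]; simp [mySplit]
  | succ n ih =>
    intro l cur acc h
    cases l with
    | nil => rw [PySem.Chars.splitOn.go.eq_def]; simp [mySplit]
    | cons c t =>
      rw [PySem.Chars.splitOn.go.eq_def]
      simp only [List.isPrefixOf, Bool.and_true]
      by_cases hc : c = '_'
      · subst hc
        simp only [beq_self_eq_true, if_true]
        have hd : List.drop (['_'] : List Char).length ('_' :: t) = t := by simp
        rw [hd, ih t [] (List.reverse cur :: acc) (by simpa using h)]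
        simp [mySplit]
      · have : ('_' == c) = false := by simpa using fun he => hc he.symm
        simp only [this, Bool.false_eq_true, if_false]
        rw [ih t (c :: cur) acc (by simpa using h)]
        simp [mySplit, hc]

theorem splitOn_eq_mySplit (cs : List Char) :
    PySem.Chars.splitOn cs ['_'] = mySplit [] cs := by
  unfold PySem.Chars.splitOn
  rw [splitOn_go_mySplit (cs.length + 1) cs [] [] (by omega)]
  simp

theorem mySplit_ne_nil (t pre : List Char) : mySplit pre t ≠ [] := by
  induction t generalizing pre with
  | nil => simp [mySplit]
  | cons c t ih =>
    simp only [mySplit]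
    split_ifs
    · simp
    · exact ih _

theorem mySplit_pre (t : List Char) : ∀ (pre h : List Char) (tl : List (List Char)),
    mySplit [] t = h :: tl → mySplit pre t = (pre ++ h) :: tl := by
  induction t with
  | nil =>
    intro pre h tl heq
    simp [mySplit] at heq ⊢
    simp [heq.1, heq.2]
  | cons c t ih =>
    intro pre h tl heq
    by_cases hc : c = '_'
    · subst hc
      simp [mySplit] at heq ⊢
      exact ⟨by simp [heq.1], heq.2⟩
    · simp only [mySplit, if_neg hc, List.nil_append] at heq ⊢
      obtain ⟨h', tl', heq'⟩ : ∃ h' tl', mySplit [] t = h' :: tl' := by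
        cases he : mySplit [] t with
        | nil => exact absurd he (mySplit_ne_nil t [])
        | cons a b => exact ⟨a, b, rfl⟩
      rw [ih [c] h' tl' heq'] at heq
      rw [ih (pre ++ [c]) h' tl' heq']
      cases heq
      simp

theorem capF_eq (p : List Char) :
    PySem.Chars.upper (PySem.Chars.slice p none (some 1)) ++ PySem.Chars.slice p (some 1) none = capFn p := by
  rw [show PySem.Chars.slice p none (some 1) = PySem.List.slice p none (some 1) from
    PySem.Chars.slice_eq_listSlice p none (some 1)]
  rw [show PySem.Chars.slice p (some 1) none = PySem.List.slice p (some 1) none from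
    PySem.Chars.slice_eq_listSlice p (some 1) none]
  rw [PySem.List.slice_to p (by norm_num), PySem.List.slice_from p (by norm_num)]
  cases p with
  | nil => simp [capFn, PySem.Chars.upper]
  | cons c t => simp [capFn, PySem.Chars.upper]

theorem join_nil_cons (x : List Char) (xs : List (List Char)) :
    PySem.Chars.join [] (x :: xs) = x ++ PySem.Chars.join [] xs := by
  cases xs with
  | nil => simp [PySem.Chars.join_singleton, PySem.Chars.join_nil]
  | cons y r => rw [PySem.Chars.join_cons_cons]; simp

theorem join_cap_mySplit (cs : List Char) :
    (PySem.Chars.join [] ((mySplit [] cs).map capFn) = Rflag true cs)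
    ∧ (∀ h tl, mySplit [] cs = h :: tl → h ++ PySem.Chars.join [] (tl.map capFn) = Rflag false cs) := by
  induction cs with
  | nil =>
    constructor
    · simp [mySplit, capFn, PySem.Chars.join_singleton, Rflag]
    · intro h tl heq
      simp [mySplit] at heq
      simp [heq.1, heq.2, PySem.Chars.join_nil, Rflag]
  | cons c t ih =>
    by_cases hc : c = '_'
    · subst hc
      constructor
      · simp only [mySplit, if_true, List.map_cons]
        rw [join_nil_cons]
        simp [capFn, Rflag, ih.1]
      · intro h tl heq
        simp only [mySplit, if_true] at heq
        cases heq
        simp [Rflag, ih.1]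
    · obtain ⟨h', tl', heq'⟩ : ∃ h' tl', mySplit [] t = h' :: tl' := by
        cases he : mySplit [] t with
        | nil => exact absurd he (mySplit_ne_nil t [])
        | cons a b => exact ⟨a, b, rfl⟩
      have hsplit : mySplit [] (c :: t) = (c :: h') :: tl' := by
        simp only [mySplit, if_neg hc, List.nil_append]
        rw [mySplit_pre t [c] h' tl' heq']
        simp
      constructor
      · rw [hsplit]
        simp only [List.map_cons]
        rw [join_nil_cons]
        have : capFn (c :: h') = PySem.Chars.upperChar c :: h' := by simp [capFn]
        rw [this]
        simp only [List.cons_append]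
        rw [ih.2 h' tl' heq']
        simp [Rflag, hc]
      · intro h tl heq
        rw [hsplit] at heq
        cases heq
        simp only [List.cons_append]
        rw [ih.2 h' tl' heq']
        simp [Rflag, hc]

theorem alt_chars (cs : List Char) :
    PySem.Chars.join []
      ((PySem.Chars.splitOn cs ['_']).map (fun p =>
        PySem.Chars.upper (PySem.Chars.slice p none (some 1)) ++ PySem.Chars.slice p (some 1) none))
    = Rflag true cs := by
  simp only [capF_eq, splitOn_eq_mySplit]
  exact (join_cap_mySplit cs).1

-- ===== VERDICT (by name: the statement is the Claim_ definition above) =====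
theorem get_databinding_name_spec : Claim_equal_get_databinding_name := by
  intro s _ hpre
  unfold Spec_get_databinding_name
  unfold get_databinding_name get_databinding_name_alt
  cases hs : s.toList with
  | nil => exact absurd (String.toList_eq_nil_iff.mp hs) hpre
  | cons c t =>
    simp only
    rw [show PySem.List.pyGet? (c :: t) 0 = some c from by
      simp [PySem.List.pyGet?, PySem.List.pyIdx?]]
    simp only [List.set_cons_zero]
    have hA := loopA_eq (PySem.Chars.upperChar c :: t) []
    simp only [List.nil_append, List.length_nil, Nat.cast_zero, Nat.zero_add] at hA
    rw [hA]
    rw [replace_filter, filter_loopRec (PySem.Chars.upperChar c :: t).length _ (le_refl _)]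
    rw [Rflag_cap, alt_chars (c :: t)]
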